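-- pv_equiv track=rewrite | github.com/MikeBrew123/carnivore-weekly | scripts/extract_wiki_keywords.py | generate_keyword_groups
-- ===== SOURCE A (Python) =====
-- from typing import Dict, List
--
-- def generate_keyword_groups(keywords: Dict[str, str]) -> Dict[str, List[str]]:
--     """
--     Group keywords by their target URL for deduplication.
--
--     Args:
--         keywords: Dictionary mapping keywords to URLs
--
--     Returns:
--         Dictionary mapping URLs to lists of keywords
--     """
--     groups = {}
--
--     for keyword, url in keywords.items():
--         if url not in groups:
--             groups[url] = []
--         groups[url].append(keyword)
--
--     # Sort keywords by length (longest first) to prioritize specific terms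
--     for url in groups:
--         groups[url].sort(key=len, reverse=True)
--
--     return groups
-- ===== SOURCE B (Python) =====
-- def generate_keyword_groups(keywords):
--     """
--     Group keywords by their target URL for deduplication.
--
--     Instead of a grouping pass into a dict followed by per-group in-place
--     sorts, collect the distinct URLs (first-appearance order) and build each
--     group directly by a comprehension over the items, sorted longest-first.
--     """
--     urls = list(dict.fromkeys(keywords.values()))
--     return {
--         url: sorted((kw for kw, u in keywords.items() if u == url),
--                     key=len, reverse=True)
--         for url in urls
--     }
-- ===== Notes on version B (the rewrite author's own statement) =====
-- stated objective: alternative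
-- what changed: A builds groups by a single dict-grouping pass then sorts each group in place; B never builds a mutable grouping dict: it deduplicates the URLs once and constructs each group directly with a filtering comprehension over the items, sorted longest-first.
import Mathlib
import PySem

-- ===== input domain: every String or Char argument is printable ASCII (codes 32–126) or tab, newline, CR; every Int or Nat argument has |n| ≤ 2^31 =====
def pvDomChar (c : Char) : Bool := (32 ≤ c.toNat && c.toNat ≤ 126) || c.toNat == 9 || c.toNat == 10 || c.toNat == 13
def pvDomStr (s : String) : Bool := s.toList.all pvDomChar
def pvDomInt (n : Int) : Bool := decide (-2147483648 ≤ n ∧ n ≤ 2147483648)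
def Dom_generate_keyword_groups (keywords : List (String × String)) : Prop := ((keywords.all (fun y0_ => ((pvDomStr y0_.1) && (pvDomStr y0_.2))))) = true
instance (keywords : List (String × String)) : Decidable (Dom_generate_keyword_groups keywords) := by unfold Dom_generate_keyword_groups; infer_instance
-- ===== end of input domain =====

-- B replaces A's dict-grouping pass + per-group in-place sorts with one URL deduplication and
-- a direct filtering comprehension per URL; alternative decomposition, same results.

-- ===== PORT A =====
def generate_keyword_groups (keywords : List (String × String)) : List (String × List String) :=
  let groups : PySem.Dict String (List String) :=
    keywords.foldl (fun g p => g.modify p.2 [] (fun ws => ws ++ [p.1])) PySem.Dict.empty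
  groups.items.map (fun q => (q.1, PySem.List.sorted q.2 PySem.Str.len true))

-- ===== PORT B =====
def generate_keyword_groups_alt (keywords : List (String × String)) : List (String × List String) :=
  let urls := PySem.List.dedup (keywords.map (fun p => p.2))
  urls.map (fun url =>
    (url,
      PySem.List.sorted ((keywords.filter (fun p => p.2 == url)).map (fun p => p.1))
        PySem.Str.len true))

-- ===== PRECONDITION & SPEC =====
def Spec_generate_keyword_groups (keywords : List (String × String)) (out : List (String × List String)) : Prop := out = generate_keyword_groups_alt keywords
instance (keywords : List (String × String)) (out : List (String × List String)) : Decidable (Spec_generate_keyword_groups keywords out) := by unfold Spec_generate_keyword_groups; infer_instance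

-- ===== CLAIM =====
def Claim_equal_generate_keyword_groups : Prop := ∀ (keywords : List (String × String)), Dom_generate_keyword_groups keywords → Spec_generate_keyword_groups keywords (generate_keyword_groups keywords)

-- ===== LEMMAS AND PROOFS =====
lemma getD_group_fold (l : List (String × String)) (d : PySem.Dict String (List String)) (k : String) :
    (l.foldl (fun g p => g.modify p.2 [] (fun ws => ws ++ [p.1])) d).getD k []
      = d.getD k [] ++ (l.filter (fun q => q.2 == k)).map (fun q => q.1) := by
  have hswap : l.foldl (fun g p => g.modify p.2 [] (fun ws => ws ++ [p.1])) d
      = (l.map (fun p => (p.2, p.1))).foldl (fun g q => g.modify q.1 [] (fun ws => ws ++ [q.2])) d := by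
    rw [List.foldl_map]
  rw [hswap, PySem.Dict.getD_foldl_modify_append, List.filter_map, List.map_map]
  rfl

lemma keys_group_fold (l : List (String × String)) :
    (l.foldl (fun g p => g.modify p.2 [] (fun ws => ws ++ [p.1]))
        (PySem.Dict.empty : PySem.Dict String (List String))).keys
      = PySem.List.dedup (l.map (fun p => p.2)) := by
  rw [PySem.Dict.keys_foldl_modify_key l (fun p => p.2) [] (fun _ p ws => ws ++ [p.1]),
    PySem.Set.update_eq_append_filter]
  simp [PySem.Dict.keys_empty, PySem.Set.contains]

-- ===== VERDICT =====
theorem generate_keyword_groups_spec : Claim_equal_generate_keyword_groups := by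
  intro keywords _
  show generate_keyword_groups keywords = generate_keyword_groups_alt keywords
  simp only [generate_keyword_groups, generate_keyword_groups_alt]
  set dA := keywords.foldl (fun g p => g.modify p.2 [] (fun ws => ws ++ [p.1]))
      (PySem.Dict.empty : PySem.Dict String (List String)) with hdA
  have ndA : dA.keys.Nodup :=
    PySem.Dict.nodup_keys_foldl_modify_key keywords (fun p => p.2) []
      (fun _ p ws => ws ++ [p.1]) _ PySem.Dict.nodup_keys_empty
  rw [PySem.Dict.items_eq_map_keys dA ndA [], List.map_map, hdA, keys_group_fold]
  apply List.map_congr_left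
  intro k _
  show (fun q => (q.1, PySem.List.sorted q.2 PySem.Str.len true)) ((fun k => (k, dA.getD k [])) k) = _
  simp only [hdA, getD_group_fold, PySem.Dict.getD_empty, List.nil_append]
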